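-- pv_equiv track=rewrite | github.com/h1r9do/Network-Dashboard | test/nightly_inventory_collection_db.py | parse_show_inventory
-- ===== SOURCE A (Python) =====
-- def parse_show_inventory(output):
--     """Parse show inventory output"""
--     inventory = []
--     current_item = {}
--
--     for line in output.split('\n'):
--         if line.startswith('NAME:'):
--             if current_item:
--                 inventory.append(current_item)
--             current_item = {'name': line.split('"')[1] if '"' in line else ''}
--         elif 'DESCR:' in line and current_item:
--             current_item['description'] = line.split('"')[1] if '"' in line else ''
--         elif 'PID:' in line and current_item:
--             parts = line.split()
--             for i, part in enumerate(parts):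
--                 if part == 'PID:' and i+1 < len(parts):
--                     current_item['pid'] = parts[i+1].rstrip(',')
--                 elif part == 'SN:' and i+1 < len(parts):
--                     current_item['serial'] = parts[i+1].rstrip(',')
--
--     if current_item:
--         inventory.append(current_item)
--
--     return inventory
-- ===== SOURCE B (Python) =====
-- def _quoted(line):
--     return line.split('"')[1] if '"' in line else ''
--
--
-- def _build(head, body):
--     """Build one inventory dict from a NAME line and the lines following it."""
--     item = {'name': _quoted(head)}
--     for line in body:
--         if 'DESCR:' in line:
--             item['description'] = _quoted(line)
--         elif 'PID:' in line:
--             parts = line.split()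
--             for i, part in enumerate(parts):
--                 if part == 'PID:' and i + 1 < len(parts):
--                     item['pid'] = parts[i + 1].rstrip(',')
--                 elif part == 'SN:' and i + 1 < len(parts):
--                     item['serial'] = parts[i + 1].rstrip(',')
--     return item
--
--
-- def parse_show_inventory(output):
--     """Parse show inventory output: group lines into per-NAME records, then map each record to a dict."""
--     lines = output.split('\n')
--     records = []
--     i = 0
--     n = len(lines)
--     while i < n:
--         if lines[i].startswith('NAME:'):
--             j = i + 1
--             while j < n and not lines[j].startswith('NAME:'):
--                 j += 1
--             records.append((lines[i], lines[i + 1:j]))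
--             i = j
--         else:
--             i += 1
--     return [_build(head, body) for head, body in records]
-- ===== Notes on version B (the rewrite author's own statement) =====
-- stated objective: alternative
-- what changed: B replaces A's single-pass accumulator (a current dict carried through all lines with flush-on-NAME/at-end bookkeeping) by a two-stage decomposition: first group the lines into (NAME-line, following-lines) records, dropping lines before the first NAME, then map each record independently to its dict.
import Mathlib
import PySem

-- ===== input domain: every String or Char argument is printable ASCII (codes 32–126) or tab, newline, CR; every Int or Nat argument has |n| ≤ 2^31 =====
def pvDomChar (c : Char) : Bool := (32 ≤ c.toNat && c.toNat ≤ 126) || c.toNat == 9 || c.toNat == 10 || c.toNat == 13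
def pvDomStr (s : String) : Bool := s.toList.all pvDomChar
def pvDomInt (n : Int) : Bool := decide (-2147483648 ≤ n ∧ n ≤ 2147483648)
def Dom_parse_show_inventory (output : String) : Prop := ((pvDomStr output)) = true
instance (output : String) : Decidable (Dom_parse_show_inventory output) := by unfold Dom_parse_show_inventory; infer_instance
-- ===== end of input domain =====

-- B regroups the lines into per-NAME records first and then maps each record to its dict
-- (alternative decomposition, same O(n) cost); return values agree on every input.


-- ===== PORT A =====

def pvNAME : List Char := "NAME:".toList
def pvDESCR : List Char := "DESCR:".toList
def pvPID : List Char := "PID:".toList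
def pvSN : List Char := "SN:".toList

-- line.split('"')[1] if '"' in line else ''   (this expression appears verbatim in A and in Source B)
def pvQuoted (line : List Char) : String :=
  if PySem.Chars.isIn ['"'] line then
    String.ofList (((PySem.Chars.splitOn line ['"']).getD 1 []))
  else ""

-- s.rstrip(',') — ported by hand (PySem has no rstrip-with-chars); exact: drops exactly the trailing ','s
def pvRstripComma (s : List Char) : String :=
  String.ofList (s.reverse.dropWhile (· == ',')).reverse

-- the inner 'for i, part in enumerate(parts)' PID/SN loop (identical in A's source and Source B)
def pvPidLoop (cur : PySem.Dict String String) (parts : List (List Char)) : PySem.Dict String String :=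
  (PySem.List.enumerate parts).foldl
    (fun d ip =>
      if ip.2 = pvPID ∧ ip.1 + 1 < (parts.length : Int) then
        d.insert "pid" (pvRstripComma ((PySem.List.pyGet? parts (ip.1 + 1)).getD []))
      else if ip.2 = pvSN ∧ ip.1 + 1 < (parts.length : Int) then
        d.insert "serial" (pvRstripComma ((PySem.List.pyGet? parts (ip.1 + 1)).getD []))
      else d)
    cur

-- the body of A's 'for line in output.split('\n')'
def pvStepA (st : List (PySem.Dict String String) × PySem.Dict String String) (line : List Char) :
    List (PySem.Dict String String) × PySem.Dict String String :=
  if PySem.Chars.startswith line pvNAME then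
    ((if st.2.items = [] then st.1 else st.1 ++ [st.2]),
     PySem.Dict.empty.insert "name" (pvQuoted line))
  else if PySem.Chars.isIn pvDESCR line ∧ st.2.items ≠ [] then
    (st.1, st.2.insert "description" (pvQuoted line))
  else if PySem.Chars.isIn pvPID line ∧ st.2.items ≠ [] then
    (st.1, pvPidLoop st.2 (PySem.Chars.split₀ line))
  else st

def parse_show_inventory (output : String) : List (List (String × String)) :=
  let r := (PySem.Chars.splitOn output.toList ['\n']).foldl pvStepA ([], PySem.Dict.empty)
  let inv := if r.2.items = [] then r.1 else r.1 ++ [r.2]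
  inv.map (·.items)

-- ===== PORT B =====

-- _build's per-line if/elif body (Source B's 'for line in body')
def pvBodyStep (item : PySem.Dict String String) (line : List Char) : PySem.Dict String String :=
  if PySem.Chars.isIn pvDESCR line then
    item.insert "description" (pvQuoted line)
  else if PySem.Chars.isIn pvPID line then
    pvPidLoop item (PySem.Chars.split₀ line)
  else item

-- _build(head, body)
def pvBuild (head : List Char) (body : List (List Char)) : List (String × String) :=
  (body.foldl pvBodyStep (PySem.Dict.empty.insert "name" (pvQuoted head))).items

def pvNotName (l : List Char) : Bool := !PySem.Chars.startswith l pvNAME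

-- the grouping scan (Source B's while-loops: skip non-NAME lines; at a NAME line take the
-- following non-NAME lines as the record's body and continue from the next NAME line)
def pvRecs : List (List Char) → List (List (String × String))
  | [] => []
  | l :: ls =>
    if PySem.Chars.startswith l pvNAME then
      pvBuild l (ls.takeWhile pvNotName) :: pvRecs (ls.dropWhile pvNotName)
    else pvRecs ls
termination_by ls => ls.length
decreasing_by
  · exact Nat.lt_succ_of_le (List.length_dropWhile_le _ _)
  · exact Nat.lt_succ_self _

def parse_show_inventory_alt (output : String) : List (List (String × String)) :=
  pvRecs (PySem.Chars.splitOn output.toList ['\n'])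

-- ===== PRECONDITION & SPEC =====
def Spec_parse_show_inventory (output : String) (out : List (List (String × String))) : Prop := out = parse_show_inventory_alt output
instance (output : String) (out : List (List (String × String))) : Decidable (Spec_parse_show_inventory output out) := by unfold Spec_parse_show_inventory; infer_instance

-- ===== CLAIM (what is proved, stated in full; the proofs are below) =====
def Claim_equal_parse_show_inventory : Prop := ∀ (output : String), Dom_parse_show_inventory output → Spec_parse_show_inventory output (parse_show_inventory output)

-- ===== LEMMAS AND PROOFS =====

-- proof-side variant of pvRecs that keeps the dicts
def pvRecsD : List (List Char) → List (PySem.Dict String String)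
  | [] => []
  | l :: ls =>
    if PySem.Chars.startswith l pvNAME then
      (ls.takeWhile pvNotName).foldl pvBodyStep (PySem.Dict.empty.insert "name" (pvQuoted l))
        :: pvRecsD (ls.dropWhile pvNotName)
    else pvRecsD ls
termination_by ls => ls.length
decreasing_by
  · exact Nat.lt_succ_of_le (List.length_dropWhile_le _ _)
  · exact Nat.lt_succ_self _

theorem pvRecs_eq_recsD (lines : List (List Char)) :
    pvRecs lines = (pvRecsD lines).map (·.items) := by
  fun_induction pvRecs lines with
  | case1 => simp [pvRecsD]
  | case2 l ls hl ih => simp [pvRecsD, hl, pvBuild, ih]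
  | case3 l ls hl ih => simp [pvRecsD, hl, ih]

theorem pvInsert_ne_nil {d : PySem.Dict String String} (k : String) (v : String) :
    (d.insert k v).items ≠ [] := by
  by_cases hc : d.contains k
  · have hne : d.items ≠ [] := by
      intro h0; simp [PySem.Dict.contains, h0] at hc
    simpa [PySem.Dict.insert, hc] using hne
  · simp [PySem.Dict.insert, hc]

theorem pvPidLoop_ne_nil (parts : List (List Char)) {d : PySem.Dict String String}
    (h : d.items ≠ []) : (pvPidLoop d parts).items ≠ [] := by
  unfold pvPidLoop
  generalize PySem.List.enumerate parts = l
  induction l generalizing d with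
  | nil => simpa using h
  | cons x xs ih =>
    simp only [List.foldl_cons]
    split_ifs <;> first | exact ih (pvInsert_ne_nil _ _) | exact ih h

theorem pvBodyStep_ne_nil (line : List Char) {d : PySem.Dict String String}
    (h : d.items ≠ []) : (pvBodyStep d line).items ≠ [] := by
  unfold pvBodyStep
  split_ifs <;>
    first | exact pvInsert_ne_nil _ _ | exact pvPidLoop_ne_nil _ h | exact h

theorem pvStepA_body {st : List (PySem.Dict String String) × PySem.Dict String String}
    {line : List Char} (hn : pvNotName line = true) (h : st.2.items ≠ []) :
    pvStepA st line = (st.1, pvBodyStep st.2 line) := by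
  have hs : PySem.Chars.startswith line pvNAME = false := by
    simpa [pvNotName] using hn
  unfold pvStepA pvBodyStep
  rw [hs]
  simp only [Bool.false_eq_true, if_false, ne_eq, h, not_false_eq_true, and_true]
  split_ifs <;> rfl

def pvFinish (st : List (PySem.Dict String String) × PySem.Dict String String) :
    List (PySem.Dict String String) :=
  if st.2.items = [] then st.1 else st.1 ++ [st.2]

theorem pvMainInv (lines : List (List Char)) :
    ∀ (inv : List (PySem.Dict String String)) (cur : PySem.Dict String String),
      cur.items ≠ [] →
      pvFinish (lines.foldl pvStepA (inv, cur)) =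
        inv ++ ((lines.takeWhile pvNotName).foldl pvBodyStep cur
                  :: pvRecsD (lines.dropWhile pvNotName)) := by
  induction lines with
  | nil => intro inv cur h; simp [pvFinish, h, pvRecsD]
  | cons l ls ih =>
    intro inv cur h
    by_cases hl : PySem.Chars.startswith l pvNAME = true
    · have hstep : pvStepA (inv, cur) l =
          (inv ++ [cur], PySem.Dict.empty.insert "name" (pvQuoted l)) := by
        simp [pvStepA, hl, h]
      rw [List.foldl_cons, hstep, ih _ _ (pvInsert_ne_nil _ _)]
      simp [pvNotName, hl, pvRecsD]
    · have hn : pvNotName l = true := by simp [pvNotName, hl]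
      rw [List.foldl_cons, pvStepA_body hn h, ih _ _ (pvBodyStep_ne_nil _ h)]
      simp [pvNotName, hl]

theorem pvPrefix (lines : List (List Char)) :
    pvFinish (lines.foldl pvStepA ([], PySem.Dict.empty)) = pvRecsD lines := by
  induction lines with
  | nil => simp [pvFinish, PySem.Dict.empty, pvRecsD]
  | cons l ls ih =>
    by_cases hl : PySem.Chars.startswith l pvNAME = true
    · have hstep : pvStepA ([], PySem.Dict.empty) l =
          ([], PySem.Dict.empty.insert "name" (pvQuoted l)) := by
        simp [pvStepA, hl, PySem.Dict.empty]
      rw [List.foldl_cons, hstep, pvMainInv _ _ _ (pvInsert_ne_nil _ _)]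
      simp [pvRecsD, hl]
    · have hstep : pvStepA ([], PySem.Dict.empty) l = ([], PySem.Dict.empty) := by
        simp [pvStepA, hl, PySem.Dict.empty]
      rw [List.foldl_cons, hstep, ih]
      simp [pvRecsD, hl]

-- ===== VERDICT (by name: the statement is the Claim_ definition above) =====
theorem parse_show_inventory_spec : Claim_equal_parse_show_inventory := by
  intro output _
  unfold Spec_parse_show_inventory parse_show_inventory parse_show_inventory_alt
  rw [pvRecs_eq_recsD, ← pvPrefix]
  rfl
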